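-- pv_equiv track=rewrite | github.com/ProjetPP/PPP-QuestionParsing-Grammatical | ppp_nlp_classical/preprocessing.py | findQuotations
-- ===== SOURCE A (Python) =====
-- def findQuotations(r):
--     """
--         Return a list of elements of the form (begin,end,set of integers).
--         Each set is a set of words index belonging to a same quotation.
--         Begin and end are the index of the quotations marks
--     """
--     index=1
--     inQuote=False
--     quotationList=[]
--     quotationSet = set()
--     for word in r['words']:
--         if word[0] == "``":
--             assert not inQuote
--             inQuote = True
--             begin=index
--         elif word[0] == "''":
--             assert inQuote
--             inQuote=False
--             quotationList+=[(begin,index,quotationSet)]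
--             quotationSet = set()
--         elif inQuote:
--             quotationSet.add(index)
--         index+=1
--     assert not inQuote
--     return quotationList
-- ===== SOURCE B (Python) =====
-- def findQuotations(r):
--     """
--         Return a list of elements of the form (begin,end,set of integers).
--         Each set is a set of words index belonging to a same quotation.
--         Begin and end are the index of the quotations marks
--     """
--     events = []
--     for i, word in enumerate(r['words'], 1):
--         if word[0] in ("``", "''"):
--             events.append((word[0], i))
--     quotationList = []
--     k = 0
--     while k < len(events):
--         kind, begin = events[k]
--         assert kind == "``"
--         assert k + 1 < len(events)
--         kind2, end = events[k + 1]
--         assert kind2 == "''"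
--         quotationList.append((begin, end, set(range(begin + 1, end))))
--         k += 2
--     return quotationList
-- ===== Notes on version B (the rewrite author's own statement) =====
-- stated objective: alternative
-- what changed: Instead of a single stateful scan that tracks inQuote/begin and accumulates a running set, B first collects the list of quote-mark events (kind, index) in one pass, then pairs consecutive open/close events and emits each span's interior as set(range(begin+1, end)).
import Mathlib
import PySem

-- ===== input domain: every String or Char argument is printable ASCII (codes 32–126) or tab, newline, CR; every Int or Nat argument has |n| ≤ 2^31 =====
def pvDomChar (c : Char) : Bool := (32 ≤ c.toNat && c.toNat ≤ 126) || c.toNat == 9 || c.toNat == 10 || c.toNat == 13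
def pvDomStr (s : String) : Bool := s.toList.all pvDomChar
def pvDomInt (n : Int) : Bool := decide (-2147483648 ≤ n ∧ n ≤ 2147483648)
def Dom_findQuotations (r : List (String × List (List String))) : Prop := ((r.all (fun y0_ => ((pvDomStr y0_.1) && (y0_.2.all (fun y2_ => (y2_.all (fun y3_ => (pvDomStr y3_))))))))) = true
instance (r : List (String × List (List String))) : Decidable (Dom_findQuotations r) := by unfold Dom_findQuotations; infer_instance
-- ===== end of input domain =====

-- B replaces A's single stateful scan (inQuote flag, running set) by an event-collection
-- pass followed by pairing of consecutive open/close marks; alternative decomposition, same cost.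


-- ===== PORT A =====
-- loop state: (index, inQuote, begin, quotationList, quotationSet)
def fqStep (st : Int × Bool × Int × List (Int × Int × List Int) × PySem.Set Int)
    (w : List String) : Int × Bool × Int × List (Int × Int × List Int) × PySem.Set Int :=
  match st with
  | (index, inQuote, beg, ql, qs) =>
    if (PySem.List.pyGet? w 0).getD "" = "``" then
      -- assert not inQuote (raises outside Pre_)
      (index + 1, true, index, ql, qs)
    else if (PySem.List.pyGet? w 0).getD "" = "''" then
      -- assert inQuote (raises outside Pre_)
      (index + 1, false, beg, ql ++ [(beg, index, qs)], PySem.Set.empty)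
    else if inQuote then
      (index + 1, inQuote, beg, ql, PySem.Set.add qs index)
    else
      (index + 1, inQuote, beg, ql, qs)

def findQuotations (r : List (String × List (List String))) : List (Int × Int × List Int) :=
  -- r['words'] (KeyError outside Pre_); begin starts as a dummy 0 (Python: unbound until first open mark)
  let ws := (PySem.Dict.get? (PySem.Dict.mk r) "words").getD []
  (ws.foldl fqStep (1, false, 0, [], PySem.Set.empty)).2.2.2.1

-- ===== PORT B =====
-- pass 1: collect quote-mark events (kind, 1-based index)
def fqEvents : List (List String) → Int → List (String × Int)
  | [], _ => []
  | w :: rest, i =>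
    if (PySem.List.pyGet? w 0).getD "" = "``" ∨ (PySem.List.pyGet? w 0).getD "" = "''" then
      ((PySem.List.pyGet? w 0).getD "", i) :: fqEvents rest (i + 1)
    else fqEvents rest (i + 1)

-- pass 2: pair consecutive events (asserts on kinds raise outside Pre_; a lone trailing event asserts too)
def fqPair : List (String × Int) → List (Int × Int × List Int)
  | (_, b) :: (_, e) :: rest =>
    (b, e, PySem.Set.ofList (PySem.List.pyRange (b + 1) e 1)) :: fqPair rest
  | _ => []

def findQuotations_alt (r : List (String × List (List String))) : List (Int × Int × List Int) :=
  fqPair (fqEvents ((PySem.Dict.get? (PySem.Dict.mk r) "words").getD []) 1)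

-- ===== PRECONDITION & SPEC =====
-- does the sequence of quote marks alternate ``, '', ``, '' … and end closed? (inQ = currently inside a quote)
def fqOk : Bool → List (List String) → Bool
  | inQ, [] => !inQ
  | inQ, w :: rest =>
    if (PySem.List.pyGet? w 0).getD "" = "``" then !inQ && fqOk true rest
    else if (PySem.List.pyGet? w 0).getD "" = "''" then inQ && fqOk false rest
    else fqOk inQ rest

-- Pre_ excludes exactly the inputs where Python A raises: a missing 'words' key (KeyError),
-- an empty word (IndexError on word[0]), and quote marks that do not alternate open/close
-- ending closed (AssertionError). A returns on no excluded input; B raises there too.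
def Pre_findQuotations (r : List (String × List (List String))) : Prop :=
  (PySem.Dict.get? (PySem.Dict.mk r) "words").isSome = true ∧
  (∀ w ∈ (PySem.Dict.get? (PySem.Dict.mk r) "words").getD [], w ≠ []) ∧
  fqOk false ((PySem.Dict.get? (PySem.Dict.mk r) "words").getD []) = true

instance (r : List (String × List (List String))) : Decidable (Pre_findQuotations r) := by
  unfold Pre_findQuotations; infer_instance

def pvWitness_findQuotations : (List (String × List (List String))) :=
  [("words", [["``"], ["Hello"], ["world"], ["''"], ["."]])]

def Spec_findQuotations (r : List (String × List (List String))) (out : List (Int × Int × List Int)) : Prop := out = findQuotations_alt r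
instance (r : List (String × List (List String))) (out : List (Int × Int × List Int)) : Decidable (Spec_findQuotations r out) := by unfold Spec_findQuotations; infer_instance

-- ===== CLAIM (what is proved, stated in full; the proofs are below) =====
def Claim_equal_findQuotations : Prop := ∀ (r : List (String × List (List String))), Dom_findQuotations r → Pre_findQuotations r → Spec_findQuotations r (findQuotations r)

-- ===== LEMMAS AND PROOFS =====

-- the loop invariant: A's fold from a well-formed state produces acc ++ B's pairing of the remaining events
theorem fq_loop (ws : List (List String)) : ∀ (idx b : Int) (acc : List (Int × Int × List Int)) (inQ : Bool),
    fqOk inQ ws = true → (inQ = true → b < idx) →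
    (ws.foldl fqStep (idx, inQ, b, acc,
        (if inQ then PySem.List.pyRange (b + 1) idx 1 else PySem.Set.empty))).2.2.2.1
      = acc ++ fqPair ((if inQ then [("``", b)] else []) ++ fqEvents ws idx) := by
  induction ws with
  | nil =>
    intro idx b acc inQ hok _
    cases inQ with
    | false => simp [fqEvents, fqPair]
    | true => simp [fqOk] at hok
  | cons w rest ih =>
    intro idx b acc inQ hok hb
    by_cases h1 : (PySem.List.pyGet? w 0).getD "" = "``"
    · -- open mark: must be outside a quote
      rw [fqOk] at hok; rw [if_pos h1] at hok
      obtain ⟨hnq, hok'⟩ := Bool.and_eq_true_iff.mp hok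
      cases inQ with
      | true => simp at hnq
      | false =>
        have := ih (idx + 1) idx acc true hok' (fun _ => by omega)
        simp only [if_pos] at this
        rw [PySem.List.pyRange_one_eq_nil (by omega)] at this
        simp only [List.foldl_cons, Bool.false_eq_true, if_false]
        rw [fqStep, if_pos h1]
        simp only [PySem.Set.empty] at this ⊢
        rw [this]
        simp [fqEvents, h1]
    · by_cases h2 : (PySem.List.pyGet? w 0).getD "" = "''"
      · -- close mark: must be inside a quote
        rw [fqOk] at hok; rw [if_neg h1, if_pos h2] at hok
        obtain ⟨hq, hok'⟩ := Bool.and_eq_true_iff.mp hok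
        cases inQ with
        | false => simp at hq
        | true =>
          have := ih (idx + 1) b (acc ++ [(b, idx, PySem.List.pyRange (b + 1) idx 1)]) false hok'
            (by simp)
          simp only [List.foldl_cons] at this ⊢
          rw [fqStep, if_neg h1, if_pos h2]
          simp only [if_pos, Bool.false_eq_true, if_false, PySem.Set.empty] at this ⊢
          rw [this]
          have hnd : PySem.Set.ofList (PySem.List.pyRange (b + 1) idx 1)
              = PySem.List.pyRange (b + 1) idx 1 :=
            PySem.Set.ofList_eq_self_of_nodup _ (PySem.List.nodup_pyRange_one _ _)
          simp [fqEvents, fqPair, h2, hnd]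
      · -- ordinary word
        rw [fqOk] at hok; rw [if_neg h1, if_neg h2] at hok
        simp only [List.foldl_cons]
        rw [fqStep, if_neg h1, if_neg h2]
        cases inQ with
        | false =>
          have := ih (idx + 1) b acc false hok (by simp)
          simp only [Bool.false_eq_true, if_false] at this ⊢
          rw [this]
          simp [fqEvents, h1, h2]
        | true =>
          have hlt : b < idx := hb rfl
          have hadd : PySem.Set.add (PySem.List.pyRange (b + 1) idx 1) idx
              = PySem.List.pyRange (b + 1) (idx + 1) 1 := by
            rw [PySem.Set.add_of_not_mem (by
              intro hmem
              have := (PySem.List.mem_pyRange_one).mp hmem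
              omega)]
            rw [PySem.List.pyRange_one_succ_right (by omega)]
          have := ih (idx + 1) b acc true hok (fun _ => by omega)
          simp only [if_pos] at this ⊢
          rw [hadd, this]
          simp [fqEvents, h1, h2]

-- ===== VERDICT (by name: the statement is the Claim_ definition above) =====
theorem findQuotations_spec : Claim_equal_findQuotations := by
  intro r _hdom hpre
  obtain ⟨-, -, hok⟩ := hpre
  unfold Spec_findQuotations findQuotations findQuotations_alt
  have := fq_loop ((PySem.Dict.get? (PySem.Dict.mk r) "words").getD []) 1 0 [] false hok
    (by simp)
  simpa using this
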